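-- pv_equiv track=rewrite | github.com/EtienneL321/AdventOfCode | AdventOfCode2024/day7.py | permutate_operators
-- ===== SOURCE A (Python) =====
-- def permutate_operators(depth, cur):
--   operators = ["+", "*", "|"]
--
--   if depth == 0:
--     return [cur]
--
--   permutations = list()
--   for o in operators:
--     permutations += permutate_operators(depth - 1, cur + [o])
--
--   return permutations
-- ===== SOURCE B (Python) =====
-- def permutate_operators(depth, cur):
--   result = [cur]
--   for _ in range(depth):
--     result = [r + [o] for r in result for o in ["+", "*", "|"]]
--   return result
-- ===== Notes on version B (the rewrite author's own statement) =====
-- stated objective: idiomatic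
-- what changed: Replaces the three-way recursion with a flat iterative breadth-first build: start from [cur] and for each of depth rounds extend every partial list by each operator, producing identical lists in identical order without any call stack.
import Mathlib
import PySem

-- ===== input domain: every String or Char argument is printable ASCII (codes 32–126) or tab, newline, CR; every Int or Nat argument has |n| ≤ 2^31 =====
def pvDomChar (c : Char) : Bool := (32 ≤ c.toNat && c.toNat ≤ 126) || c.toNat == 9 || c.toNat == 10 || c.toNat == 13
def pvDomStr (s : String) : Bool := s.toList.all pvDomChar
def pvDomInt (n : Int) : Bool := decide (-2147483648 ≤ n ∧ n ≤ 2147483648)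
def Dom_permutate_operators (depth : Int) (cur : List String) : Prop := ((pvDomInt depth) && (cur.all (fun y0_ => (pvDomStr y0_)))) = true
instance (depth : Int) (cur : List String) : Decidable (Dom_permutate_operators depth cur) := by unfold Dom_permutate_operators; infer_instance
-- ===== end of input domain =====

-- B replaces A's three-way recursion by an iterative level-by-level build over `range depth`
-- (same lists in the same order): a plainer, stack-free decomposition of the same task.


-- ===== PORT A =====
-- Literal port of A's recursion; the `depth < 0` branch is unreachable inside Pre_
-- (Python diverges there with RecursionError) and exists only for totality.
def permutate_operators (depth : Int) (cur : List String) : List (List String) :=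
  if depth = 0 then [cur]
  else if depth < 0 then []
  else
    ["+", "*", "|"].foldl
      (fun permutations o => permutations ++ permutate_operators (depth - 1) (cur ++ [o]))
      ([] : List (List String))
termination_by depth.toNat
decreasing_by omega

-- ===== PORT B =====
-- Port of Source B: result = [cur]; for _ in range(depth): result = [r + [o] for r in result for o in ops]
def permutate_operators_alt (depth : Int) (cur : List String) : List (List String) :=
  (List.range depth.toNat).foldl
    (fun result _ => result.flatMap (fun r => ["+", "*", "|"].map (fun o => r ++ [o])))
    [cur]

-- ===== PRECONDITION & SPEC =====
-- Pre_ excludes negative depth, on which Python's A recurses forever (RecursionError).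
def Pre_permutate_operators (depth : Int) (cur : List String) : Prop := 0 ≤ depth
instance (depth : Int) (cur : List String) : Decidable (Pre_permutate_operators depth cur) := by unfold Pre_permutate_operators; infer_instance
def pvWitness_permutate_operators : Int × List String := (2, ["1", "2", "3"])

def Spec_permutate_operators (depth : Int) (cur : List String) (out : List (List String)) : Prop := out = permutate_operators_alt depth cur
instance (depth : Int) (cur : List String) (out : List (List String)) : Decidable (Spec_permutate_operators depth cur out) := by unfold Spec_permutate_operators; infer_instance

-- ===== CLAIM (what is proved, stated in full; the proofs are below) =====
def Claim_equal_permutate_operators : Prop := ∀ (depth : Int) (cur : List String), Dom_permutate_operators depth cur → Pre_permutate_operators depth cur → Spec_permutate_operators depth cur (permutate_operators depth cur)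

-- ===== LEMMAS AND PROOFS =====

-- Common recursion both ports are reduced to.
def pvG : Nat → List String → List (List String)
  | 0, cur => [cur]
  | n + 1, cur => ["+", "*", "|"].flatMap (fun o => pvG n (cur ++ [o]))

theorem permA_eq_pvG (n : Nat) : ∀ cur : List String, permutate_operators (n : Int) cur = pvG n cur := by
  induction n with
  | zero => intro cur; simp [permutate_operators, pvG]
  | succ n ih =>
    intro cur
    rw [permutate_operators]
    have h0 : ((n + 1 : Nat) : Int) ≠ 0 := by omega
    have h1 : ¬ ((n + 1 : Nat) : Int) < 0 := by omega
    have h2 : ((n + 1 : Nat) : Int) - 1 = (n : Int) := by omega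
    simp only [h0, h1, if_false, h2]
    simp [List.foldl, pvG, List.flatMap, ih]

theorem pvG_succ_back (n : Nat) : ∀ cur : List String,
    pvG (n + 1) cur = (pvG n cur).flatMap (fun r => ["+", "*", "|"].map (fun o => r ++ [o])) := by
  induction n with
  | zero => intro cur; simp [pvG, List.flatMap]
  | succ n ih =>
    intro cur
    show pvG (n + 2) cur = _
    calc pvG (n + 2) cur
        = ["+", "*", "|"].flatMap (fun o => pvG (n + 1) (cur ++ [o])) := rfl
      _ = ["+", "*", "|"].flatMap (fun o => (pvG n (cur ++ [o])).flatMap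
            (fun r => ["+", "*", "|"].map (fun p => r ++ [p]))) := by simp only [ih]
      _ = (["+", "*", "|"].flatMap (fun o => pvG n (cur ++ [o]))).flatMap
            (fun r => ["+", "*", "|"].map (fun p => r ++ [p])) := by rw [List.flatMap_assoc]
      _ = (pvG (n + 1) cur).flatMap (fun r => ["+", "*", "|"].map (fun p => r ++ [p])) := rfl

theorem permB_eq_pvG (n : Nat) (cur : List String) :
    (List.range n).foldl
      (fun result _ => result.flatMap (fun r => ["+", "*", "|"].map (fun o => r ++ [o])))
      [cur] = pvG n cur := by
  induction n with
  | zero => simp [pvG]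
  | succ n ih =>
    rw [List.range_succ, List.foldl_append, ih, pvG_succ_back]
    rfl

-- ===== VERDICT (by name: the statement is the Claim_ definition above) =====
theorem permutate_operators_spec : Claim_equal_permutate_operators := by
  intro depth cur _ hpre
  have hd : depth = (depth.toNat : Int) := by
    unfold Pre_permutate_operators at hpre; omega
  show permutate_operators depth cur = permutate_operators_alt depth cur
  rw [hd, permutate_operators_alt, Int.toNat_natCast, permB_eq_pvG, permA_eq_pvG]
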